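-- pv_equiv track=rewrite | github.com/tinkerer-red/GMLC | _python/gml_explicit_paths_from_html.py | expand_alias_variants
-- ===== SOURCE A (Python) =====
-- from typing import Dict, List, Set, Tuple
--
-- ALIAS_PAIRS = [
--     ("colour", "color"),
--     ("normalised", "normalized"),
--     ("randomise", "randomize"),
--     ("grey", "gray"),
--     ("textcoord", "texcoord"),
-- ]
--
-- def expand_alias_variants(base_candidate: str) -> Set[str]:
--     seed_variants: Set[str] = set()
--     seed_variants.add(base_candidate)
--     seed_variants.add(base_candidate.replace("_", "-"))
--     seed_variants.add(base_candidate.replace("-", "_"))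
--
--     changed_flag = True
--     while changed_flag:
--         changed_flag = False
--         next_variants: Set[str] = set(seed_variants)
--         for left_text, right_text in ALIAS_PAIRS:
--             for value_text in seed_variants:
--                 if left_text in value_text:
--                     flipped_text = value_text.replace(left_text, right_text)
--                     if flipped_text not in next_variants:
--                         next_variants.add(flipped_text)
--                         changed_flag = True
--                 if right_text in value_text:
--                     flipped_text = value_text.replace(right_text, left_text)
--                     if flipped_text not in next_variants:
--                         next_variants.add(flipped_text)
--                         changed_flag = True
--         seed_variants = next_variants
--     return seed_variants
-- ===== SOURCE B (Python) =====
-- ALIAS_PAIRS = [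
--     ("colour", "color"),
--     ("normalised", "normalized"),
--     ("randomise", "randomize"),
--     ("grey", "gray"),
--     ("textcoord", "texcoord"),
-- ]
--
-- def expand_alias_variants(base_candidate: str):
--     # Frontier-based closure: each round rewrites only the variants discovered
--     # in the previous round, instead of rescanning the whole set every round.
--     seen = set()
--     frontier = []
--     for s in (base_candidate,
--               base_candidate.replace("_", "-"),
--               base_candidate.replace("-", "_")):
--         if s not in seen:
--             seen.add(s)
--             frontier.append(s)
--     while frontier:
--         new = []
--         for left_text, right_text in ALIAS_PAIRS:
--             for v in frontier:
--                 if left_text in v: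
--                     f = v.replace(left_text, right_text)
--                     if f not in seen:
--                         seen.add(f)
--                         new.append(f)
--                 if right_text in v:
--                     f = v.replace(right_text, left_text)
--                     if f not in seen:
--                         seen.add(f)
--                         new.append(f)
--         frontier = new
--     return seen
-- ===== Notes on version B (the rewrite author's own statement) =====
-- stated objective: alternative
-- what changed: A repeatedly rescans the entire variant set until a full pass adds nothing; B runs a worklist/frontier BFS that rewrites only the variants discovered in the previous round, visiting each variant once.
import Mathlib
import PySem

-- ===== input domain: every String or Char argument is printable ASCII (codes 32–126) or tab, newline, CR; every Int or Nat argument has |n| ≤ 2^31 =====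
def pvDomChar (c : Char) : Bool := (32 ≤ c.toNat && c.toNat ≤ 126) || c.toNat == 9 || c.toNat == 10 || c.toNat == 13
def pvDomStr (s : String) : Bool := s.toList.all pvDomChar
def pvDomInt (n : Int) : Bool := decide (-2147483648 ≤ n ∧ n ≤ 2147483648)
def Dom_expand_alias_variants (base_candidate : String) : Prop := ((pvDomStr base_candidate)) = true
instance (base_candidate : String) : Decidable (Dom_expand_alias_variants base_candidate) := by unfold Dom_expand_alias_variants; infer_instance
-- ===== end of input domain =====

-- B replaces A's repeated full rescans of the variant set by a frontier/worklist BFS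
-- that rewrites only the newly discovered variants each round (objective: alternative).
-- The Python while-loops are ported with a fuel guard (length+4 rounds) that only makes
-- the same computation total; both loops stop at their fixpoint long before it runs out.


def aliasPairs : List (String × String) :=
  [("colour", "color"), ("normalised", "normalized"), ("randomise", "randomize"),
   ("grey", "gray"), ("textcoord", "texcoord")]

-- ===== PORT A =====
-- one 'if left/right in value: …' block of A's inner loop
def paTry (st : List String × Bool) (hit : Bool) (f : String) : List String × Bool :=
  if hit then (if PySem.Set.contains st.1 f then st else (PySem.Set.add st.1 f, true)) else st

def paStep (pr : String × String) (st : List String × Bool) (v : String) : List String × Bool :=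
  paTry (paTry st (PySem.Str.isIn pr.1 v) (PySem.Str.replace v pr.1 pr.2))
        (PySem.Str.isIn pr.2 v) (PySem.Str.replace v pr.2 pr.1)

-- one round of A's while-loop: next = set(seed); scan ALL of seed for every pair
def paRound (seed : List String) : List String × Bool :=
  aliasPairs.foldl (fun st pr => seed.foldl (paStep pr) st) (seed, false)

def paLoop : Nat → List String → List String
  | 0, seed => seed
  | f + 1, seed =>
    let r := paRound seed
    if r.2 then paLoop f r.1 else r.1

def expand_alias_variants (base_candidate : String) : List String :=
  let s0 := PySem.Set.add (PySem.Set.add (PySem.Set.add PySem.Set.empty base_candidate)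
              (PySem.Str.replace base_candidate "_" "-"))
              (PySem.Str.replace base_candidate "-" "_")
  paLoop (base_candidate.toList.length + 4) s0

-- ===== PORT B =====
-- one 'if left/right in v: …' block of B's inner loop (seen, new)
def pbTry (st : List String × List String) (hit : Bool) (f : String) : List String × List String :=
  if hit then (if PySem.Set.contains st.1 f then st else (PySem.Set.add st.1 f, st.2 ++ [f])) else st

def pbStep (pr : String × String) (st : List String × List String) (v : String) : List String × List String :=
  pbTry (pbTry st (PySem.Str.isIn pr.1 v) (PySem.Str.replace v pr.1 pr.2))
        (PySem.Str.isIn pr.2 v) (PySem.Str.replace v pr.2 pr.1)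

-- one round of B's while-loop: rewrite only the frontier
def pbRound (seen frontier : List String) : List String × List String :=
  aliasPairs.foldl (fun st pr => frontier.foldl (pbStep pr) st) (seen, [])

def pbLoop : Nat → List String → List String → List String
  | 0, seen, _ => seen
  | f + 1, seen, frontier =>
    if frontier.isEmpty then seen
    else
      let r := pbRound seen frontier
      pbLoop f r.1 r.2

-- B's seeding loop over the three hyphen/underscore forms
def pbSeed (base_candidate : String) : List String × List String :=
  [base_candidate, PySem.Str.replace base_candidate "_" "-",
   PySem.Str.replace base_candidate "-" "_"].foldl
    (fun st s => if PySem.Set.contains st.1 s then st else (st.1 ++ [s], st.2 ++ [s])) ([], [])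

def expand_alias_variants_alt (base_candidate : String) : List String :=
  let sf := pbSeed base_candidate
  pbLoop (base_candidate.toList.length + 4) sf.1 sf.2

-- ===== PRECONDITION & SPEC =====
def Spec_expand_alias_variants (base_candidate : String) (out : List String) : Prop := out = expand_alias_variants_alt base_candidate
instance (base_candidate : String) (out : List String) : Decidable (Spec_expand_alias_variants base_candidate out) := by unfold Spec_expand_alias_variants; infer_instance

-- ===== CLAIM (what is proved, stated in full; the proofs are below) =====
def Claim_equal_expand_alias_variants : Prop := ∀ (base_candidate : String), Dom_expand_alias_variants base_candidate → Spec_expand_alias_variants base_candidate (expand_alias_variants base_candidate)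

-- ===== LEMMAS AND PROOFS =====

-- every applicable one-step rewrite of v is already in S
def FlipsIn (v : String) (S : List String) : Prop :=
  ∀ pr ∈ aliasPairs,
    (PySem.Str.isIn pr.1 v = true → PySem.Str.replace v pr.1 pr.2 ∈ S) ∧
    (PySem.Str.isIn pr.2 v = true → PySem.Str.replace v pr.2 pr.1 ∈ S)

-- A's round state vs B's round state
def StRel (seed : List String) (stA : List String × Bool) (stB : List String × List String) : Prop :=
  stA.1 = stB.1 ∧ stB.1 = seed ++ stB.2 ∧ stA.2 = !stB.2.isEmpty

theorem try_rel {seed : List String} {stA : List String × Bool} {stB : List String × List String}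
    (h : StRel seed stA stB) (hit : Bool) (f : String) :
    StRel seed (paTry stA hit f) (pbTry stB hit f) := by
  obtain ⟨h1, h2, h3⟩ := h
  unfold paTry pbTry
  cases hit with
  | false => simpa using ⟨h1, h2, h3⟩
  | true =>
    simp only [if_true]
    rw [h1]
    by_cases hm : f ∈ stB.1
    · have hc : PySem.Set.contains stB.1 f = true := (PySem.Set.contains_iff _ _).mpr hm
      rw [if_pos hc, if_pos hc]
      exact ⟨h1, h2, h3⟩
    · have hc : ¬ PySem.Set.contains stB.1 f = true := fun h => hm ((PySem.Set.contains_iff _ _).mp h)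
      rw [if_neg hc, if_neg hc]
      refine ⟨rfl, ?_, ?_⟩
      · rw [PySem.Set.add_of_not_mem hm, h2, List.append_assoc]
      · simp

theorem step_rel {seed : List String} {stA : List String × Bool} {stB : List String × List String}
    (h : StRel seed stA stB) (pr : String × String) (v : String) :
    StRel seed (paStep pr stA v) (pbStep pr stB v) := by
  unfold paStep pbStep
  have h1 := try_rel h (PySem.Str.isIn pr.1 v) (PySem.Str.replace v pr.1 pr.2)
  exact try_rel h1 (PySem.Str.isIn pr.2 v) (PySem.Str.replace v pr.2 pr.1)

theorem foldl_step_rel {seed : List String} (pr : String × String) (fr : List String) :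
    ∀ {stA stB}, StRel seed stA stB →
      StRel seed (fr.foldl (paStep pr) stA) (fr.foldl (pbStep pr) stB) := by
  induction fr with
  | nil => intro stA stB h; simpa using h
  | cons x t ih => intro stA stB h; exact ih (step_rel h pr x)

theorem try_skip {st : List String × Bool} {hit : Bool} {f : String}
    (h : hit = true → f ∈ st.1) : paTry st hit f = st := by
  unfold paTry
  cases hit with
  | false => simp
  | true =>
    have hc : PySem.Set.contains st.1 f = true := (PySem.Set.contains_iff _ _).mpr (h rfl)
    simp only [if_true]
    rw [if_pos hc]

theorem step_skip {st : List String × Bool} {pr : String × String} {v : String}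
    (h1 : PySem.Str.isIn pr.1 v = true → PySem.Str.replace v pr.1 pr.2 ∈ st.1)
    (h2 : PySem.Str.isIn pr.2 v = true → PySem.Str.replace v pr.2 pr.1 ∈ st.1) :
    paStep pr st v = st := by
  unfold paStep
  rw [try_skip h1, try_skip h2]

-- A's scan over the already-processed prefix changes nothing
theorem foldl_old_skip {seed : List String} (pr : String × String) (old : List String) :
    ∀ {st : List String × Bool},
      (∀ v ∈ old,
        (PySem.Str.isIn pr.1 v = true → PySem.Str.replace v pr.1 pr.2 ∈ seed) ∧
        (PySem.Str.isIn pr.2 v = true → PySem.Str.replace v pr.2 pr.1 ∈ seed)) →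
      (∃ t, st.1 = seed ++ t) →
      old.foldl (paStep pr) st = st := by
  induction old with
  | nil => intro st _ _; rfl
  | cons x rest ih =>
    intro st hold hpre
    obtain ⟨t, ht⟩ := hpre
    have hx := hold x (by simp)
    have hskip : paStep pr st x = st := by
      refine step_skip (fun h => ?_) (fun h => ?_)
      · rw [ht]; exact List.mem_append_left _ (hx.1 h)
      · rw [ht]; exact List.mem_append_left _ (hx.2 h)
    rw [List.foldl_cons, hskip]
    exact ih (fun v hv => hold v (by simp [hv])) ⟨t, ht⟩

-- one pair's pass: A over old ++ fr matches B over fr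
theorem pair_rel {old fr : List String} (pr : String × String)
    (hold : ∀ v ∈ old,
      (PySem.Str.isIn pr.1 v = true → PySem.Str.replace v pr.1 pr.2 ∈ old ++ fr) ∧
      (PySem.Str.isIn pr.2 v = true → PySem.Str.replace v pr.2 pr.1 ∈ old ++ fr))
    {stA : List String × Bool} {stB : List String × List String}
    (h : StRel (old ++ fr) stA stB) :
    StRel (old ++ fr) ((old ++ fr).foldl (paStep pr) stA) (fr.foldl (pbStep pr) stB) := by
  rw [List.foldl_append]
  have hskip : old.foldl (paStep pr) stA = stA := by
    refine foldl_old_skip pr old hold ⟨stB.2, ?_⟩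
    rw [h.1]; exact h.2.1
  rw [hskip]
  exact foldl_step_rel pr fr h

-- the whole round
theorem round_rel_aux {old fr : List String} (prs : List (String × String))
    (hold : ∀ v ∈ old, ∀ pr ∈ prs,
      (PySem.Str.isIn pr.1 v = true → PySem.Str.replace v pr.1 pr.2 ∈ old ++ fr) ∧
      (PySem.Str.isIn pr.2 v = true → PySem.Str.replace v pr.2 pr.1 ∈ old ++ fr)) :
    ∀ {stA : List String × Bool} {stB : List String × List String}, StRel (old ++ fr) stA stB →
      StRel (old ++ fr) (prs.foldl (fun st pr => (old ++ fr).foldl (paStep pr) st) stA)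
        (prs.foldl (fun st pr => fr.foldl (pbStep pr) st) stB) := by
  induction prs with
  | nil => intro stA stB h; simpa using h
  | cons p rest ih =>
    intro stA stB h
    simp only [List.foldl_cons]
    exact ih (fun v hv pr hpr => hold v hv pr (by simp [hpr]))
      (pair_rel p (fun v hv => hold v hv p (by simp)) h)

theorem round_rel {old fr : List String}
    (hold : ∀ v ∈ old, FlipsIn v (old ++ fr)) :
    StRel (old ++ fr) (paRound (old ++ fr)) (pbRound (old ++ fr) fr) := by
  unfold paRound pbRound
  exact round_rel_aux aliasPairs (fun v hv pr hpr => hold v hv pr hpr)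
    ⟨rfl, by simp, by simp⟩

-- monotonicity of B's state
theorem pbTry_mono (st : List String × List String) (hit : Bool) (f : String) :
    ∃ t, (pbTry st hit f).1 = st.1 ++ t := by
  unfold pbTry
  cases hit with
  | false => exact ⟨[], by simp⟩
  | true =>
    by_cases hm : f ∈ st.1
    · have hc : PySem.Set.contains st.1 f = true := (PySem.Set.contains_iff _ _).mpr hm
      exact ⟨[], by rw [if_pos hc]; simp⟩
    · have hc : ¬ PySem.Set.contains st.1 f = true := fun h => hm ((PySem.Set.contains_iff _ _).mp h)
      exact ⟨[f], by rw [if_neg hc]; exact PySem.Set.add_of_not_mem hm⟩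

theorem pbStep_mono (pr : String × String) (st : List String × List String) (v : String) :
    ∃ t, (pbStep pr st v).1 = st.1 ++ t := by
  unfold pbStep
  obtain ⟨t1, h1⟩ := pbTry_mono st (PySem.Str.isIn pr.1 v) (PySem.Str.replace v pr.1 pr.2)
  obtain ⟨t2, h2⟩ := pbTry_mono (pbTry st (PySem.Str.isIn pr.1 v) (PySem.Str.replace v pr.1 pr.2))
    (PySem.Str.isIn pr.2 v) (PySem.Str.replace v pr.2 pr.1)
  exact ⟨t1 ++ t2, by rw [h2, h1, List.append_assoc]⟩

theorem pbFold_mono (pr : String × String) (fr : List String) :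
    ∀ st : List String × List String, ∃ t, (fr.foldl (pbStep pr) st).1 = st.1 ++ t := by
  induction fr with
  | nil => intro st; exact ⟨[], by simp⟩
  | cons x rest ih =>
    intro st
    obtain ⟨t1, h1⟩ := pbStep_mono pr st x
    obtain ⟨t2, h2⟩ := ih (pbStep pr st x)
    exact ⟨t1 ++ t2, by rw [List.foldl_cons, h2, h1, List.append_assoc]⟩

theorem pbPairs_mono (prs : List (String × String)) (fr : List String) :
    ∀ st : List String × List String,
      ∃ t, (prs.foldl (fun st pr => fr.foldl (pbStep pr) st) st).1 = st.1 ++ t := by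
  induction prs with
  | nil => intro st; exact ⟨[], by simp⟩
  | cons p rest ih =>
    intro st
    obtain ⟨t1, h1⟩ := pbFold_mono p fr st
    obtain ⟨t2, h2⟩ := ih (fr.foldl (pbStep p) st)
    exact ⟨t1 ++ t2, by simp only [List.foldl_cons]; rw [h2, h1, List.append_assoc]⟩

theorem pbTry_mem {st : List String × List String} {f : String} :
    f ∈ (pbTry st true f).1 := by
  unfold pbTry
  by_cases hm : f ∈ st.1
  · have hc : PySem.Set.contains st.1 f = true := (PySem.Set.contains_iff _ _).mpr hm
    simp only [if_true]
    rw [if_pos hc]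
    exact hm
  · have hc : ¬ PySem.Set.contains st.1 f = true := fun h => hm ((PySem.Set.contains_iff _ _).mp h)
    simp only [if_true]
    rw [if_neg hc, PySem.Set.add_of_not_mem hm]
    simp

theorem pbStep_mem (pr : String × String) (st : List String × List String) (v : String) :
    (PySem.Str.isIn pr.1 v = true → PySem.Str.replace v pr.1 pr.2 ∈ (pbStep pr st v).1) ∧
    (PySem.Str.isIn pr.2 v = true → PySem.Str.replace v pr.2 pr.1 ∈ (pbStep pr st v).1) := by
  unfold pbStep
  constructor
  · intro h
    obtain ⟨t, ht⟩ := pbTry_mono (pbTry st (PySem.Str.isIn pr.1 v) (PySem.Str.replace v pr.1 pr.2))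
      (PySem.Str.isIn pr.2 v) (PySem.Str.replace v pr.2 pr.1)
    rw [ht]
    refine List.mem_append_left _ ?_
    rw [h] at *
    exact pbTry_mem
  · intro h
    rw [h]
    exact pbTry_mem

theorem pbFold_mem (pr : String × String) (fr : List String) {v : String} (hv : v ∈ fr) :
    ∀ st : List String × List String,
      (PySem.Str.isIn pr.1 v = true → PySem.Str.replace v pr.1 pr.2 ∈ (fr.foldl (pbStep pr) st).1) ∧
      (PySem.Str.isIn pr.2 v = true → PySem.Str.replace v pr.2 pr.1 ∈ (fr.foldl (pbStep pr) st).1) := by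
  induction fr with
  | nil => cases hv
  | cons x rest ih =>
    intro st
    rcases List.mem_cons.mp hv with h | h
    · subst h
      obtain ⟨t, ht⟩ := pbFold_mono pr rest (pbStep pr st v)
      have hm := pbStep_mem pr st v
      constructor
      · intro hhit; rw [List.foldl_cons, ht]; exact List.mem_append_left _ (hm.1 hhit)
      · intro hhit; rw [List.foldl_cons, ht]; exact List.mem_append_left _ (hm.2 hhit)
    · exact ih h (pbStep pr st x)

theorem pbPairs_mem (prs : List (String × String)) (fr : List String)
    {pr : String × String} (hpr : pr ∈ prs) {v : String} (hv : v ∈ fr) :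
    ∀ st : List String × List String,
      (PySem.Str.isIn pr.1 v = true →
        PySem.Str.replace v pr.1 pr.2 ∈ (prs.foldl (fun st p => fr.foldl (pbStep p) st) st).1) ∧
      (PySem.Str.isIn pr.2 v = true →
        PySem.Str.replace v pr.2 pr.1 ∈ (prs.foldl (fun st p => fr.foldl (pbStep p) st) st).1) := by
  induction prs with
  | nil => cases hpr
  | cons p rest ih =>
    intro st
    simp only [List.foldl_cons]
    rcases List.mem_cons.mp hpr with h | h
    · subst h
      obtain ⟨t, ht⟩ := pbPairs_mono rest fr (fr.foldl (pbStep pr) st)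
      have hm := pbFold_mem pr fr hv st
      constructor
      · intro hhit; rw [ht]; exact List.mem_append_left _ (hm.1 hhit)
      · intro hhit; rw [ht]; exact List.mem_append_left _ (hm.2 hhit)
    · exact ih h (fr.foldl (pbStep p) st)

theorem pbLoop_nil (f : Nat) (s : List String) : pbLoop f s [] = s := by
  cases f <;> simp [pbLoop]

theorem pbRound_nil (s : List String) : pbRound s [] = (s, []) := rfl

-- core: A's fixpoint loop = B's frontier loop, list for list
theorem loop_eq : ∀ (fuel : Nat) (old fr : List String),
    (∀ v ∈ old, FlipsIn v (old ++ fr)) →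
    paLoop fuel (old ++ fr) = pbLoop fuel (old ++ fr) fr := by
  intro fuel
  induction fuel with
  | zero => intro old fr _; rfl
  | succ f ih =>
    intro old fr hold
    have hrel := round_rel hold
    obtain ⟨h1, h2, h3⟩ := hrel
    by_cases hfr : fr = []
    · subst hfr
      rw [pbRound_nil] at h1 h2 h3
      simp only [pbLoop, List.isEmpty_nil, if_true]
      show (let r := paRound (old ++ []); if r.2 then paLoop f r.1 else r.1) = old ++ []
      simp only [h3, List.isEmpty_nil, Bool.not_true, Bool.false_eq_true, if_false]
      simpa using h1
    · have hfrE : fr.isEmpty = false := by simpa [List.isEmpty_iff] using hfr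
      show (let r := paRound (old ++ fr); if r.2 then paLoop f r.1 else r.1) =
        pbLoop (f + 1) (old ++ fr) fr
      simp only [pbLoop, hfrE, Bool.false_eq_true, if_false]
      by_cases hnew : (pbRound (old ++ fr) fr).2 = []
      · have hA2 : (paRound (old ++ fr)).2 = false := by rw [h3, hnew]; simp
        have hA1 : (paRound (old ++ fr)).1 = old ++ fr := by rw [h1, h2, hnew, List.append_nil]
        simp only [hA2, Bool.false_eq_true, if_false, hA1]
        rw [h2, hnew, List.append_nil, pbLoop_nil]
      · have hA2 : (paRound (old ++ fr)).2 = true := by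
          rw [h3]; simpa [List.isEmpty_iff] using hnew
        simp only [hA2, if_true]
        rw [h1, h2]
        refine ih (old ++ fr) (pbRound (old ++ fr) fr).2 ?_
        intro v hv pr hpr
        rw [← h2]
        rcases List.mem_append.mp hv with hvo | hvf
        · have := hold v hvo pr hpr
          constructor
          · intro hhit
            rw [h2]
            exact List.mem_append_left _ (this.1 hhit)
          · intro hhit
            rw [h2]
            exact List.mem_append_left _ (this.2 hhit)
        · exact pbPairs_mem aliasPairs fr hpr hvf (old ++ fr, [])

-- the two seeding loops build the same (set, frontier)
theorem seed_fold (xs : List String) :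
    ∀ s : List String,
      xs.foldl (fun st x => if PySem.Set.contains st.1 x then st else (st.1 ++ [x], st.2 ++ [x])) (s, s)
        = (xs.foldl PySem.Set.add s, xs.foldl PySem.Set.add s) := by
  induction xs with
  | nil => intro s; rfl
  | cons x rest ih =>
    intro s
    have hstep : (if PySem.Set.contains s x then (s, s) else (s ++ [x], s ++ [x]))
        = ((PySem.Set.add s x : List String), (PySem.Set.add s x : List String)) := by
      by_cases hm : x ∈ s
      · have hc : PySem.Set.contains s x = true := (PySem.Set.contains_iff _ _).mpr hm
        rw [if_pos hc, PySem.Set.add_of_mem hm]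
      · have hc : ¬ PySem.Set.contains s x = true := fun h => hm ((PySem.Set.contains_iff _ _).mp h)
        rw [if_neg hc, PySem.Set.add_of_not_mem hm]
    simp only [List.foldl_cons]
    rw [hstep]
    exact ih (PySem.Set.add s x)

-- ===== VERDICT (by name: the statement is the Claim_ definition above) =====
theorem expand_alias_variants_spec : Claim_equal_expand_alias_variants := by
  intro b _
  show expand_alias_variants b = expand_alias_variants_alt b
  unfold expand_alias_variants expand_alias_variants_alt pbSeed
  rw [seed_fold]
  have : ([b, PySem.Str.replace b "_" "-", PySem.Str.replace b "-" "_"].foldl PySem.Set.add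
      PySem.Set.empty : List String)
      = PySem.Set.add (PySem.Set.add (PySem.Set.add PySem.Set.empty b)
          (PySem.Str.replace b "_" "-")) (PySem.Str.replace b "-" "_") := rfl
  rw [← this]
  have h := loop_eq (b.toList.length + 4) []
    ([b, PySem.Str.replace b "_" "-", PySem.Str.replace b "-" "_"].foldl PySem.Set.add PySem.Set.empty)
    (by intro v hv; cases hv)
  simpa using h
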